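-- pv_equiv track=rewrite | github.com/petteriTeikari/deep-biblio-tools | scripts/archive/fix_bibliography_complete.py | parse_author_year_from_key
-- ===== SOURCE A (Python) =====
-- def parse_author_year_from_key(key: str) -> tuple[str, str]:
--     """Extract author and year from a citation key."""
--     # Most keys follow pattern: author2023 or author_2023
--
--     # Find the year (4 digits, possibly followed by a letter)
--     year_start = -1
--     for i in range(len(key) - 3):
--         if key[i : i + 4].isdigit():
--             # Check if it's a valid year
--             year_num = int(key[i : i + 4])
--             if 1900 <= year_num <= 2100:
--                 year_start = i
--                 break
--
--     if year_start >= 0: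
--         # Extract year with possible suffix letter
--         year_end = year_start + 4
--         if (
--             year_end < len(key)
--             and key[year_end].isalpha()
--             and key[year_end].islower()
--         ):
--             year_end += 1
--
--         year = key[year_start:year_end]
--
--         # Extract author (everything before year, excluding underscore or space)
--         author = key[:year_start]
--         if author and author[-1] in "_":
--             author = author[:-1]
--
--         # Keep only letters
--         author = "".join(c for c in author if c.isalpha()).lower()
--
--         return author, year
--
--     return "", ""
-- ===== SOURCE B (Python) =====
-- def parse_author_year_from_key(key: str) -> tuple[str, str]:
--     """One left-to-right scan: accumulate author letters (lowercased) while
--     looking for the first 4-digit window whose value lies in 1900..2100."""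
--     n = len(key)
--     author = []
--     i = 0
--     while i + 4 <= n:
--         c0 = key[i]
--         if ('0' <= c0 <= '9' and '0' <= key[i + 1] <= '9'
--                 and '0' <= key[i + 2] <= '9' and '0' <= key[i + 3] <= '9'):
--             v = ((ord(c0) - 48) * 1000 + (ord(key[i + 1]) - 48) * 100
--                  + (ord(key[i + 2]) - 48) * 10 + (ord(key[i + 3]) - 48))
--             if 1900 <= v <= 2100:
--                 end = i + 5 if i + 4 < n and 'a' <= key[i + 4] <= 'z' else i + 4
--                 return "".join(author), key[i:end]
--         if 'a' <= c0 <= 'z':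
--             author.append(c0)
--         elif 'A' <= c0 <= 'Z':
--             author.append(chr(ord(c0) + 32))
--         i += 1
--     return "", ""
-- ===== Notes on version B (the rewrite author's own statement) =====
-- stated objective: alternative
-- what changed: Replaces A's two-phase slice-and-test search plus separate prefix slicing/underscore-strip/filter/lower passes with a single fused left-to-right character scan that checks each 4-digit window with per-character comparisons and arithmetic and accumulates the lowercased author letters as it goes, so no slicing, no int() parsing and no post-hoc filter pass.
import Mathlib
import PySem

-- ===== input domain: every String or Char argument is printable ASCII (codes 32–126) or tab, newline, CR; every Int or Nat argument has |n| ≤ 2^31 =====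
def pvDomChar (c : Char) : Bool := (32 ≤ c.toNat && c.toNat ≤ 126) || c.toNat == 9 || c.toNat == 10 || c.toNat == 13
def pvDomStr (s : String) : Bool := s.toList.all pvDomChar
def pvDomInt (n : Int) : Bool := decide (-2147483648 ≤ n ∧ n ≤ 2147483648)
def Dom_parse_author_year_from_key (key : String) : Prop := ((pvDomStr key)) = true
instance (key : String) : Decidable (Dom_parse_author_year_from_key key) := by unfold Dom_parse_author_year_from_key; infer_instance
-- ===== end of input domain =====

-- B replaces A's slice-per-index search and separate prefix slice/strip/filter/lower passes
-- by one fused scan that accumulates the lowercased author letters while hunting the year (alternative; no speed claim).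

-- ===== PORT A =====
-- the 'for i in range(len(key)-3): … break' search for year_start
def pvAFindYear (cs : List Char) : List Int → Int
  | [] => -1
  | i :: restIdx =>
      let s := PySem.List.slice cs (some i) (some (i + 4))
      if PySem.Chars.strIsdigit s then
        let yearNum := (PySem.Int.ofChars? s).getD 0   -- int(key[i:i+4]); guarded by isdigit, so always some
        if 1900 ≤ yearNum ∧ yearNum ≤ 2100 then i
        else pvAFindYear cs restIdx
      else pvAFindYear cs restIdx

-- the code after the loop ('if year_start >= 0: … return author, year / return "", ""')
def pvAFinish (cs : List Char) (yearStart : Int) : String × String :=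
  if 0 ≤ yearStart then
    let yearEnd0 : Int := yearStart + 4
    let yearEnd : Int :=
      if yearEnd0 < (cs.length : Int) ∧
         ((match PySem.List.pyGet? cs yearEnd0 with
           | some c => PySem.Chars.isalpha c && PySem.Chars.islower c
           | none => false) = true)
      then yearEnd0 + 1 else yearEnd0
    let year := PySem.List.slice cs (some yearStart) (some yearEnd)
    let author0 := PySem.List.slice cs none (some yearStart)
    let author1 := if author0 ≠ [] ∧ author0.getLast? = some '_'
                   then PySem.List.slice author0 none (some (-1)) else author0
    let author := PySem.Chars.lower (author1.filter (fun c => PySem.Chars.isalpha c))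
    (String.mk author, String.mk year)
  else ("", "")

def parse_author_year_from_key (key : String) : String × String :=
  let cs := key.toList
  pvAFinish cs (pvAFindYear cs (PySem.List.pyRange 0 ((cs.length : Int) - 3) 1))

-- ===== PORT B =====
-- Source B's while-loop: pattern 'c0 :: c1 :: c2 :: c3 :: rest' is 'i + 4 <= n'; the early
-- return is the 'some year' branch; 'author.append(…)' is 'acc ++ [ …]'.
def pvBScan (acc : List Char) : List Char → String × String
  | c0 :: c1 :: c2 :: c3 :: rest =>
      if _h : (('0' ≤ c0 ∧ c0 ≤ '9') ∧ ('0' ≤ c1 ∧ c1 ≤ '9') ∧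
              ('0' ≤ c2 ∧ c2 ≤ '9') ∧ ('0' ≤ c3 ∧ c3 ≤ '9')) ∧
             (1900 ≤ ((c0.toNat : Int) - 48) * 1000 + ((c1.toNat : Int) - 48) * 100 +
                     ((c2.toNat : Int) - 48) * 10 + ((c3.toNat : Int) - 48) ∧
              ((c0.toNat : Int) - 48) * 1000 + ((c1.toNat : Int) - 48) * 100 +
                     ((c2.toNat : Int) - 48) * 10 + ((c3.toNat : Int) - 48) ≤ 2100) then
        let year :=
          match rest with
          | c4 :: _ => if 'a' ≤ c4 ∧ c4 ≤ 'z' then [c0, c1, c2, c3, c4] else [c0, c1, c2, c3]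
          | [] => [c0, c1, c2, c3]
        (String.mk acc, String.mk year)
      else if 'a' ≤ c0 ∧ c0 ≤ 'z' then pvBScan (acc ++ [c0]) (c1 :: c2 :: c3 :: rest)
      else if 'A' ≤ c0 ∧ c0 ≤ 'Z' then pvBScan (acc ++ [Char.ofNat (c0.toNat + 32)]) (c1 :: c2 :: c3 :: rest)
      else pvBScan acc (c1 :: c2 :: c3 :: rest)
  | _ => ("", "")

def parse_author_year_from_key_alt (key : String) : String × String :=
  pvBScan [] key.toList

-- ===== PRECONDITION & SPEC =====
def Spec_parse_author_year_from_key (key : String) (out : String × String) : Prop := out = parse_author_year_from_key_alt key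
instance (key : String) (out : String × String) : Decidable (Spec_parse_author_year_from_key key out) := by unfold Spec_parse_author_year_from_key; infer_instance

-- ===== CLAIM (what is proved, stated in full; the proofs are below) =====
def Claim_equal_parse_author_year_from_key : Prop := ∀ (key : String), Dom_parse_author_year_from_key key → Spec_parse_author_year_from_key key (parse_author_year_from_key key)

-- ===== LEMMAS AND PROOFS =====

theorem pvRange_nil (lo hi : Int) (h : hi ≤ lo) : PySem.List.pyRange lo hi 1 = [] := by
  simp [PySem.List.pyRange, show ¬ lo < hi by omega]

theorem pvCharLe (a b : Char) (h : a ≤ b) : a.toNat ≤ b.toNat := by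
  simpa [Char.le_def, UInt32.le_iff_toNat_le] using h

theorem pvOfChars_digits_fin : ∀ d0 d1 d2 d3 : Fin 10,
    PySem.Int.ofChars? [Char.ofNat (48 + d0), Char.ofNat (48 + d1), Char.ofNat (48 + d2), Char.ofNat (48 + d3)]
      = some ((d0 : Int) * 1000 + (d1 : Int) * 100 + (d2 : Int) * 10 + (d3 : Int)) := by
  decide

theorem pvCharEq (c : Char) (h48 : 48 ≤ c.toNat) (h57 : c.toNat ≤ 57) :
    Char.ofNat (48 + ((⟨c.toNat - 48, by omega⟩ : Fin 10) : Nat)) = c := by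
  show Char.ofNat (48 + (c.toNat - 48)) = c
  rw [Nat.add_sub_cancel' h48, Char.ofNat_toNat]

theorem pvOfChars_digits (c0 c1 c2 c3 : Char)
    (h0 : '0' ≤ c0 ∧ c0 ≤ '9') (h1 : '0' ≤ c1 ∧ c1 ≤ '9')
    (h2 : '0' ≤ c2 ∧ c2 ≤ '9') (h3 : '0' ≤ c3 ∧ c3 ≤ '9') :
    PySem.Int.ofChars? [c0, c1, c2, c3]
      = some (((c0.toNat : Int) - 48) * 1000 + ((c1.toNat : Int) - 48) * 100 +
              ((c2.toNat : Int) - 48) * 10 + ((c3.toNat : Int) - 48)) := by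
  have a0 : 48 ≤ c0.toNat := pvCharLe '0' c0 h0.1
  have b0 : c0.toNat ≤ 57 := pvCharLe c0 '9' h0.2
  have a1 : 48 ≤ c1.toNat := pvCharLe '0' c1 h1.1
  have b1 : c1.toNat ≤ 57 := pvCharLe c1 '9' h1.2
  have a2 : 48 ≤ c2.toNat := pvCharLe '0' c2 h2.1
  have b2 : c2.toNat ≤ 57 := pvCharLe c2 '9' h2.2
  have a3 : 48 ≤ c3.toNat := pvCharLe '0' c3 h3.1
  have b3 : c3.toNat ≤ 57 := pvCharLe c3 '9' h3.2
  have key := pvOfChars_digits_fin ⟨c0.toNat - 48, by omega⟩ ⟨c1.toNat - 48, by omega⟩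
      ⟨c2.toNat - 48, by omega⟩ ⟨c3.toNat - 48, by omega⟩
  rw [pvCharEq c0 a0 b0, pvCharEq c1 a1 b1, pvCharEq c2 a2 b2, pvCharEq c3 a3 b3] at key
  rw [key]
  congr 1
  push_cast
  omega

theorem pvLeIff (a b : Char) : a ≤ b ↔ a.toNat ≤ b.toNat := by
  simp [Char.le_def, UInt32.le_iff_toNat_le]

-- one scanned character's contribution to the author accumulator
theorem pvAccStep (c : Char) :
    PySem.Chars.lower (List.filter (fun c => PySem.Chars.isalpha c) [c])
      = if 'a' ≤ c ∧ c ≤ 'z' then [c]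
        else if 'A' ≤ c ∧ c ≤ 'Z' then [Char.ofNat (c.toNat + 32)]
        else [] := by
  simp only [pvLeIff]
  by_cases h1 : 97 ≤ c.toNat ∧ c.toNat ≤ 122
  · have h2 : ¬ (65 ≤ c.toNat ∧ c.toNat ≤ 90) := by omega
    simp [PySem.Chars.lower, PySem.Chars.lowerChar, PySem.Chars.isalpha, PySem.Chars.isupper,
      PySem.Chars.islower, pvLeIff, h1, h2]
  · by_cases h2 : 65 ≤ c.toNat ∧ c.toNat ≤ 90
    · simp [PySem.Chars.lower, PySem.Chars.lowerChar, PySem.Chars.isalpha, PySem.Chars.isupper,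
        PySem.Chars.islower, pvLeIff, h1, h2]
    · simp [PySem.Chars.lower, PySem.Chars.lowerChar, PySem.Chars.isalpha, PySem.Chars.isupper,
        PySem.Chars.islower, pvLeIff, h1, h2]

-- the underscore strip before the alpha filter is a no-op
theorem pvStrip (pre : List Char) :
    PySem.Chars.lower
      ((if pre ≠ [] ∧ pre.getLast? = some '_'
        then PySem.List.slice pre none (some (-1)) else pre).filter
          (fun c => PySem.Chars.isalpha c))
      = PySem.Chars.lower (pre.filter (fun c => PySem.Chars.isalpha c)) := by
  split_ifs with h
  · obtain ⟨hne, hl⟩ := h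
    rw [PySem.List.slice_to_neg_one]
    conv_rhs => rw [← List.dropLast_concat_getLast hne]
    have hg : pre.getLast hne = '_' := by
      have h2 := List.getLast?_eq_getLast (l := pre) hne
      rw [h2] at hl
      exact Option.some.inj hl
    rw [hg]
    simp [List.filter_append, PySem.Chars.isalpha, PySem.Chars.isupper, PySem.Chars.islower]
  · rfl

theorem pvFinishEq (pre rest : List Char) (c0 c1 c2 c3 : Char) :
    pvAFinish (pre ++ c0 :: c1 :: c2 :: c3 :: rest) (pre.length : Int)
      = (String.mk (PySem.Chars.lower (List.filter (fun c => PySem.Chars.isalpha c) pre)),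
         String.mk (match rest with
           | c4 :: _ => if 'a' ≤ c4 ∧ c4 ≤ 'z' then [c0, c1, c2, c3, c4] else [c0, c1, c2, c3]
           | [] => [c0, c1, c2, c3])) := by
  have hslice4 : PySem.List.slice (pre ++ c0 :: c1 :: c2 :: c3 :: rest)
      (some (pre.length : Int)) (some ((pre.length : Int) + 4)) = [c0, c1, c2, c3] := by
    have h4 := PySem.List.slice_natCast_add (pre ++ c0 :: c1 :: c2 :: c3 :: rest) pre.length 4
    push_cast at h4
    rw [h4, List.drop_left]
    rfl
  have hauthor : PySem.List.slice (pre ++ c0 :: c1 :: c2 :: c3 :: rest) none (some (pre.length : Int)) = pre := by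
    rw [PySem.List.slice_to_natCast, List.take_left]
  simp only [pvAFinish]
  rw [if_pos (Int.natCast_nonneg pre.length)]
  cases rest with
  | nil =>
    have hnlt : ¬ ((pre.length : Int) + 4 < ((pre ++ [c0, c1, c2, c3]).length : Int) ∧
        ((match PySem.List.pyGet? (pre ++ [c0, c1, c2, c3]) ((pre.length : Int) + 4) with
          | some c => PySem.Chars.isalpha c && PySem.Chars.islower c
          | none => false) = true)) := by
      rintro ⟨h1, -⟩
      simp [List.length_append] at h1
    rw [hauthor, pvStrip, if_neg hnlt, hslice4]
  | cons c4 rest5 =>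
    have hget : PySem.List.pyGet? (pre ++ c0 :: c1 :: c2 :: c3 :: c4 :: rest5) ((pre.length : Int) + 4) = some c4 := by
      have hc : ((pre.length : Int) + 4) = ((pre.length + 4 : Nat) : Int) := by push_cast; ring
      rw [hc, PySem.List.pyGet?_natCast, List.getElem?_append_right (by omega)]
      simp
    have hlt : (pre.length : Int) + 4 < ((pre ++ c0 :: c1 :: c2 :: c3 :: c4 :: rest5).length : Int) := by
      simp [List.length_append]
      omega
    rw [hget]
    by_cases hl : 'a' ≤ c4 ∧ c4 ≤ 'z'
    · have hb : (PySem.Chars.isalpha c4 && PySem.Chars.islower c4) = true := by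
        simp [PySem.Chars.isalpha, PySem.Chars.islower, hl.1, hl.2]
      rw [hauthor, pvStrip]
      rw [if_pos ⟨hlt, hb⟩]
      have hslice5 : PySem.List.slice (pre ++ c0 :: c1 :: c2 :: c3 :: c4 :: rest5)
          (some (pre.length : Int)) (some ((pre.length : Int) + 4 + 1)) = [c0, c1, c2, c3, c4] := by
        have h5 := PySem.List.slice_natCast_add (pre ++ c0 :: c1 :: c2 :: c3 :: c4 :: rest5) pre.length 5
        push_cast at h5
        rw [show ((pre.length : Int) + 4 + 1) = (pre.length : Int) + 5 by ring, h5, List.drop_left]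
        rfl
      rw [hslice5]
      simp [hl]
    · have hb : (PySem.Chars.isalpha c4 && PySem.Chars.islower c4) = false := by
        have hlow : PySem.Chars.islower c4 = false := by
          simp only [PySem.Chars.islower]
          by_contra hx
          simp at hx
          exact hl hx
        simp [hlow]
      have hn : ¬ ((pre.length : Int) + 4 < ((pre ++ c0 :: c1 :: c2 :: c3 :: c4 :: rest5).length : Int) ∧
          ((PySem.Chars.isalpha c4 && PySem.Chars.islower c4) = true)) := by
        rintro ⟨-, h2⟩
        rw [hb] at h2
        exact Bool.false_ne_true h2
      rw [hauthor, pvStrip, if_neg hn, hslice4]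
      simp [hl]

theorem pvMain : ∀ (n : Nat) (suf : List Char), suf.length ≤ n → ∀ (pre : List Char),
    pvAFinish (pre ++ suf)
        (pvAFindYear (pre ++ suf)
          (PySem.List.pyRange (pre.length : Int) (((pre ++ suf).length : Int) - 3) 1))
      = pvBScan (PySem.Chars.lower (pre.filter (fun c => PySem.Chars.isalpha c))) suf := by
  intro n
  induction n with
  | zero =>
    intro suf hlen pre
    have hs : suf = [] := List.length_eq_zero_iff.1 (Nat.le_zero.1 hlen)
    subst hs
    rw [pvRange_nil _ _ (by simp)]
    simp [pvAFindYear, pvAFinish, pvBScan]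
  | succ n ih =>
    intro suf hlen pre
    match suf with
    | [] =>
      rw [pvRange_nil _ _ (by simp)]
      simp [pvAFindYear, pvAFinish, pvBScan]
    | [c0] =>
      rw [pvRange_nil _ _ (by simp)]
      simp [pvAFindYear, pvAFinish, pvBScan]
    | [c0, c1] =>
      rw [pvRange_nil _ _ (by simp)]
      simp [pvAFindYear, pvAFinish, pvBScan]
    | [c0, c1, c2] =>
      rw [pvRange_nil _ _ (by simp)]
      simp [pvAFindYear, pvAFinish, pvBScan]
    | c0 :: c1 :: c2 :: c3 :: rest =>
      have hrng := PySem.List.pyRange_one_cons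
        (a := (pre.length : Int)) (b := ((pre ++ (c0 :: c1 :: c2 :: c3 :: rest)).length : Int) - 3)
        (by simp [List.length_append]; omega)
      rw [hrng]
      simp only [pvAFindYear]
      have hslice : PySem.List.slice (pre ++ (c0 :: c1 :: c2 :: c3 :: rest))
          (some (pre.length : Int)) (some ((pre.length : Int) + 4)) = [c0, c1, c2, c3] := by
        have h4 := PySem.List.slice_natCast_add (pre ++ (c0 :: c1 :: c2 :: c3 :: rest)) pre.length 4
        push_cast at h4
        rw [h4, List.drop_left]
        rfl
      rw [hslice]
      by_cases hall : (('0' ≤ c0 ∧ c0 ≤ '9') ∧ ('0' ≤ c1 ∧ c1 ≤ '9') ∧ ('0' ≤ c2 ∧ c2 ≤ '9') ∧ ('0' ≤ c3 ∧ c3 ≤ '9')) ∧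
          (1900 ≤ ((c0.toNat : Int) - 48) * 1000 + ((c1.toNat : Int) - 48) * 100 +
              ((c2.toNat : Int) - 48) * 10 + ((c3.toNat : Int) - 48) ∧
           ((c0.toNat : Int) - 48) * 1000 + ((c1.toNat : Int) - 48) * 100 +
              ((c2.toNat : Int) - 48) * 10 + ((c3.toNat : Int) - 48) ≤ 2100)
      · obtain ⟨⟨d0, d1, d2, d3⟩, hy⟩ := hall
        have hdig : PySem.Chars.strIsdigit [c0, c1, c2, c3] = true := by
          simp [PySem.Chars.strIsdigit, PySem.Chars.isdigit, d0.1, d0.2, d1.1, d1.2, d2.1, d2.2, d3.1, d3.2]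
        rw [if_pos hdig, pvOfChars_digits c0 c1 c2 c3 d0 d1 d2 d3]
        simp only [Option.getD_some]
        rw [if_pos hy, pvFinishEq]
        simp only [pvBScan]
        rw [dif_pos ⟨⟨d0, d1, d2, d3⟩, hy⟩]
      · have hmiss : pvAFinish (pre ++ c0 :: c1 :: c2 :: c3 :: rest)
            (pvAFindYear (pre ++ c0 :: c1 :: c2 :: c3 :: rest)
              (PySem.List.pyRange ((pre.length : Int) + 1) (((pre ++ c0 :: c1 :: c2 :: c3 :: rest).length : Int) - 3)))
            = pvBScan (PySem.Chars.lower (List.filter (fun c => PySem.Chars.isalpha c) pre)) (c0 :: c1 :: c2 :: c3 :: rest) := by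
          have hlen' : (c1 :: c2 :: c3 :: rest).length ≤ n := by
            simp at hlen ⊢
            omega
          have ihx := ih (c1 :: c2 :: c3 :: rest) hlen' (pre ++ [c0])
          simp only [List.append_assoc, List.singleton_append] at ihx
          have hc : ((pre ++ [c0]).length : Int) = (pre.length : Int) + 1 := by simp
          rw [hc] at ihx
          rw [ihx]
          simp only [pvBScan]
          rw [dif_neg hall]
          rw [List.filter_append]
          simp only [PySem.Chars.lower, List.map_append]
          have hstep := pvAccStep c0
          simp only [PySem.Chars.lower] at hstep
          rw [hstep]
          by_cases ha : 'a' ≤ c0 ∧ c0 ≤ 'z'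
          · rw [if_pos ha, if_pos ha]
          · rw [if_neg ha, if_neg ha]
            by_cases hA : 'A' ≤ c0 ∧ c0 ≤ 'Z'
            · rw [if_pos hA, if_pos hA]
            · rw [if_neg hA, if_neg hA, List.append_nil]
        split_ifs with h1 h2
        · exfalso
          simp [PySem.Chars.strIsdigit, PySem.Chars.isdigit] at h1
          obtain ⟨d0, d1, d2, d3⟩ := h1
          rw [pvOfChars_digits c0 c1 c2 c3 d0 d1 d2 d3] at h2
          simp only [Option.getD_some] at h2
          exact hall ⟨⟨d0, d1, d2, d3⟩, h2⟩
        · exact hmiss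
        · exact hmiss


-- ===== VERDICT (by name: the statement is the Claim_ definition above) =====
theorem parse_author_year_from_key_spec : Claim_equal_parse_author_year_from_key := by
  intro key _
  unfold Spec_parse_author_year_from_key parse_author_year_from_key parse_author_year_from_key_alt
  have h := pvMain key.toList.length key.toList le_rfl []
  simpa using h
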